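-- pv_equiv track=rewrite | github.com/tonipetergugic/immusic | analysis_engine/artist_decision_payload.py | _technical_state
-- ===== SOURCE A (Python) =====
-- from typing import Any, Mapping
--
-- def _technical_state(
--     source: Mapping[str, Any],
--     area_issues: list[dict[str, Any]],
-- ) -> str:
--     if any(issue["severity"] == "problem" for issue in area_issues):
--         return "problem"
--
--     if any(issue["severity"] == "warning" for issue in area_issues):
--         return "warning"
--
--     if not source:
--         return "unavailable"
--
--     return "ok"
-- ===== SOURCE B (Python) =====
-- def _technical_state(source, area_issues):
--     saw_warning = False
--     for issue in area_issues:
--         sev = issue["severity"]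
--         if sev == "problem":
--             return "problem"
--         if sev == "warning":
--             saw_warning = True
--     if saw_warning:
--         return "warning"
--     if not source:
--         return "unavailable"
--     return "ok"
-- ===== Notes on version B (the rewrite author's own statement) =====
-- stated objective: alternative
-- what changed: Replaces A's two short-circuiting any() scans over area_issues by a single stateful pass that returns 'problem' immediately and remembers whether a warning was seen.
import Mathlib
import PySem

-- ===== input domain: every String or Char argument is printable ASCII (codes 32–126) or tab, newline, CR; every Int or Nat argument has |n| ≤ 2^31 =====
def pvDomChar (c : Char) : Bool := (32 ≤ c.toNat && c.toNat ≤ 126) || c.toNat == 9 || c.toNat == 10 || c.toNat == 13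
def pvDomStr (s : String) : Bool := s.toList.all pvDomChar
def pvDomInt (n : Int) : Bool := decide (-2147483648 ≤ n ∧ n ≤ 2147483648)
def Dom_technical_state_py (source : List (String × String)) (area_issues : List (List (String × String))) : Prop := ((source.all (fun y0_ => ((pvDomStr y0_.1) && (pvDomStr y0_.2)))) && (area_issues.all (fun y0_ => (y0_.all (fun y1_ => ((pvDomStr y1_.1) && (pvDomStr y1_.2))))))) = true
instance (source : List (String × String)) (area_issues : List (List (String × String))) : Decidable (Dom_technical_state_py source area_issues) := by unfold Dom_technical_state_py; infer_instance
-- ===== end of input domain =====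

-- B replaces A's two short-circuiting any() scans by one stateful pass (alternative decomposition, same cost).


-- dict lookup issue["severity"] (first match in the association list; none = KeyError)
def pvSev (issue : List (String × String)) : Option String := issue.lookup "severity"

-- ===== PORT A =====
-- any(issue["severity"] == t for issue in area_issues): short-circuits at the first True;
-- none = the scan hits a KeyError (excluded by Pre_; the port then returns "" as a dummy).
def pvAnySev (area_issues : List (List (String × String))) (t : String) : Option Bool :=
  match area_issues with
  | [] => some false
  | issue :: rest =>
    match pvSev issue with
    | none => none
    | some s => if s = t then some true else pvAnySev rest t

def technical_state_py (source : List (String × String)) (area_issues : List (List (String × String))) : String :=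
  match pvAnySev area_issues "problem" with
  | none => ""
  | some true => "problem"
  | some false =>
    match pvAnySev area_issues "warning" with
    | none => ""
    | some true => "warning"
    | some false => if source = [] then "unavailable" else "ok"

-- ===== PORT B =====
-- single pass carrying saw_warning; returns "problem" immediately ("" on KeyError, excluded by Pre_)
def pvLoopB (source : List (String × String)) (area_issues : List (List (String × String))) (saw_warning : Bool) : String :=
  match area_issues with
  | [] =>
    if saw_warning then "warning"
    else if source = [] then "unavailable" else "ok"
  | issue :: rest =>
    match pvSev issue with
    | none => ""
    | some s =>
      if s = "problem" then "problem"
      else pvLoopB source rest (saw_warning || s = "warning")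

def technical_state_py_alt (source : List (String × String)) (area_issues : List (List (String × String))) : String :=
  pvLoopB source area_issues false

-- ===== PRECONDITION & SPEC =====
-- Pre_ excludes exactly the inputs where the Python raises KeyError: an issue without a
-- "severity" key occurring before any issue whose severity is "problem" (both A and B raise there).
def Pre_technical_state_py (source : List (String × String)) (area_issues : List (List (String × String))) : Prop :=
  ∀ d ∈ area_issues.takeWhile (fun d => !(pvSev d = some "problem" : Bool)), (pvSev d).isSome = true
instance (source : List (String × String)) (area_issues : List (List (String × String))) : Decidable (Pre_technical_state_py source area_issues) := by unfold Pre_technical_state_py; infer_instance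

def pvWitness_technical_state_py : (List (String × String)) × (List (List (String × String))) :=
  ([("url", "x")], [[("severity", "warning")], [("severity", "ok")]])

def Spec_technical_state_py (source : List (String × String)) (area_issues : List (List (String × String))) (out : String) : Prop := out = technical_state_py_alt source area_issues
instance (source : List (String × String)) (area_issues : List (List (String × String))) (out : String) : Decidable (Spec_technical_state_py source area_issues out) := by unfold Spec_technical_state_py; infer_instance

-- ===== CLAIM (what is proved, stated in full; the proofs are below) =====
def Claim_equal_technical_state_py : Prop := ∀ (source : List (String × String)) (area_issues : List (List (String × String))), Dom_technical_state_py source area_issues → Pre_technical_state_py source area_issues → Spec_technical_state_py source area_issues (technical_state_py source area_issues)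

-- ===== LEMMAS AND PROOFS =====

-- Pre_ is preserved by dropping a non-"problem" head
lemma pre_tail (source : List (String × String)) (x : List (String × String)) (rest : List (List (String × String)))
    (hx : ¬ pvSev x = some "problem")
    (h : Pre_technical_state_py source (x :: rest)) : Pre_technical_state_py source rest := by
  intro d hd
  apply h
  simp [List.takeWhile, hx]
  exact Or.inr hd

-- B's loop computed from the two scan results, under Pre_
lemma loopB_eq (area_issues : List (List (String × String)))
    (source : List (String × String)) (saw : Bool)
    (h : Pre_technical_state_py source area_issues) :
    pvLoopB source area_issues saw =
      if pvAnySev area_issues "problem" = some true then "problem"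
      else if saw || (pvAnySev area_issues "warning" = some true) then "warning"
      else if source = [] then "unavailable" else "ok" := by
  induction area_issues generalizing saw with
  | nil => simp [pvLoopB, pvAnySev]
  | cons x rest ih =>
    cases hx : pvSev x with
    | none =>
      exfalso
      have := h x (by simp [List.takeWhile, hx])
      simp [hx] at this
    | some s =>
      by_cases hp : s = "problem"
      · subst hp
        simp [pvLoopB, pvAnySev, hx]
      · have hxp : ¬ pvSev x = some "problem" := by simp [hx, hp]
        have hrest := pre_tail source x rest hxp h
        simp only [pvLoopB, pvAnySev, hx, if_neg hp]
        rw [ih _ hrest]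
        by_cases hw : s = "warning"
        · subst hw
          simp
        · simp [hw]

-- if the "problem" scan completes with False, every issue has a severity, so the
-- "warning" scan also completes (returns some _)
lemma warn_scan_some (area_issues : List (List (String × String)))
    (source : List (String × String))
    (h : Pre_technical_state_py source area_issues)
    (hp : pvAnySev area_issues "problem" = some false) :
    ∃ b, pvAnySev area_issues "warning" = some b := by
  induction area_issues with
  | nil => exact ⟨false, rfl⟩
  | cons x rest ih =>
    cases hx : pvSev x with
    | none =>
      exfalso
      have := h x (by simp [List.takeWhile, hx])
      simp [hx] at this
    | some s =>
      simp only [pvAnySev, hx] at hp ⊢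
      split_ifs at hp with hps
      · cases hp
      · have hxp : ¬ pvSev x = some "problem" := by simp [hx, hps]
        obtain ⟨b, hb⟩ := ih (pre_tail source x rest hxp h) hp
        by_cases hw : s = "warning"
        · exact ⟨true, by simp [hw]⟩
        · exact ⟨b, by simp [hw, hb]⟩

-- the "problem" scan completes under Pre_
lemma prob_scan_some (area_issues : List (List (String × String)))
    (source : List (String × String))
    (h : Pre_technical_state_py source area_issues) :
    ∃ b, pvAnySev area_issues "problem" = some b := by
  induction area_issues with
  | nil => exact ⟨false, rfl⟩
  | cons x rest ih =>
    cases hx : pvSev x with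
    | none =>
      exfalso
      have := h x (by simp [List.takeWhile, hx])
      simp [hx] at this
    | some s =>
      by_cases hps : s = "problem"
      · exact ⟨true, by simp [pvAnySev, hx, hps]⟩
      · have hxp : ¬ pvSev x = some "problem" := by simp [hx, hps]
        obtain ⟨b, hb⟩ := ih (pre_tail source x rest hxp h)
        exact ⟨b, by simp [pvAnySev, hx, hps, hb]⟩

-- ===== VERDICT (by name: the statement is the Claim_ definition above) =====
theorem technical_state_py_spec : Claim_equal_technical_state_py := by
  intro source area_issues _ hpre
  unfold Spec_technical_state_py technical_state_py technical_state_py_alt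
  rw [loopB_eq area_issues source false hpre]
  obtain ⟨bp, hbp⟩ := prob_scan_some area_issues source hpre
  cases bp with
  | true => simp [hbp]
  | false =>
    obtain ⟨bw, hbw⟩ := warn_scan_some area_issues source hpre hbp
    cases bw <;> simp [hbp, hbw]
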